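-- pv_equiv track=rewrite | github.com/michaelayoade/dotmac-ftth-ops | scripts/migrate_tests_to_base_classes.py | _add_router_configuration
-- ===== SOURCE A (Python) =====
-- def _add_router_configuration(content: str) -> str:
--     """Add router module configuration to class."""
--     # Find test classes and add configuration
--     lines = content.splitlines()
--     new_lines = []
--     in_test_class = False
--     added_config = False
--
--     for i, line in enumerate(lines):
--         new_lines.append(line)
--
--         # Detect test class start
--         if line.strip().startswith("class Test") and ":" in line:
--             in_test_class = True
--             added_config = False
--             continue
--
--         # Add configuration after class definition
--         if in_test_class and not added_config and line.strip() and not line.strip().startswith('"""'):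
--             # Check if configuration already exists
--             if "router_module" not in content[content.find(line):content.find(line) + 500]:
--                 indent = "    "
--                 config_lines = [
--                     f'{indent}# TODO: Configure router',
--                     f'{indent}router_module = "dotmac.platform.FIXME.router"',
--                     f'{indent}router_prefix = "/FIXME"',
--                     "",
--                 ]
--                 # Insert before current line
--                 new_lines = new_lines[:-1] + config_lines + [line]
--             added_config = True
--             in_test_class = False
--
--     return "\n".join(new_lines)
-- ===== SOURCE B (Python) =====
-- def _add_router_configuration(content: str) -> str:
--     """Add router module configuration to class (index walk with an inner seek loop)."""
--     lines = content.splitlines()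
--     config_lines = [
--         '    # TODO: Configure router',
--         '    router_module = "dotmac.platform.FIXME.router"',
--         '    router_prefix = "/FIXME"',
--         "",
--     ]
--
--     def is_test_class(line):
--         return line.strip().startswith("class Test") and ":" in line
--
--     def needs_config(line):
--         pos = content.find(line)
--         return "router_module" not in content[pos:pos + 500]
--
--     out = []
--     n = len(lines)
--     i = 0
--     while i < n:
--         out.append(lines[i])
--         if not is_test_class(lines[i]):
--             i += 1
--             continue
--         # seek the first body line after the class header and insert the config there
--         j = i + 1
--         while j < n:
--             line = lines[j]
--             out.append(line)
--             if is_test_class(line):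
--                 j += 1
--                 continue
--             if line.strip() and not line.strip().startswith('"""'):
--                 if needs_config(line):
--                     out[-1:-1] = config_lines
--                 j += 1
--                 break
--             j += 1
--         i = j
--     return "\n".join(out)
-- ===== Notes on version B (the rewrite author's own statement) =====
-- stated objective: alternative
-- what changed: Replaces A's single pass with two boolean state flags by an outer index walk that, on hitting a test-class header line, runs an explicit inner seek loop to find the insertion point and splices the config there (flag-free two-loop / mutual-recursion decomposition).
import Mathlib
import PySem

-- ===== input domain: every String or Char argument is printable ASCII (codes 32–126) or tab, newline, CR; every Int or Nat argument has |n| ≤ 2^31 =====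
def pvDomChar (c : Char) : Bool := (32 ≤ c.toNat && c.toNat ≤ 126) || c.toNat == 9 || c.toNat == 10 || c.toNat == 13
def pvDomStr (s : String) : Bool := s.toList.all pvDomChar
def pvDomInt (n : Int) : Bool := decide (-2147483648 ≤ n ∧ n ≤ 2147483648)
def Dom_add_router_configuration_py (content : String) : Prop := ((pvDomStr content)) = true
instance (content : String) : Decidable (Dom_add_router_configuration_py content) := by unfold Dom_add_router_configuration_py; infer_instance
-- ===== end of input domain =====

-- B replaces A's single pass with two boolean flags by an outer index walk plus an inner
-- "seek the insertion point" loop (ported as two mutually recursive functions); objective: alternative decomposition, same cost.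

-- ===== PORT A =====
-- A's loop over enumerate(lines) with the state (new_lines, in_test_class, added_config),
-- as the obvious structural recursion over the same state.
def pvConfigA : List String :=
  ["    # TODO: Configure router",
   "    router_module = \"dotmac.platform.FIXME.router\"",
   "    router_prefix = \"/FIXME\"",
   ""]

def pvGoA (content : String) : List String → List String → Bool → Bool → List String
  | [], newLines, _, _ => newLines
  | line :: rest, newLines, inTestClass, addedConfig =>
    let newLines := newLines ++ [line]
    if (PySem.Str.startswith (PySem.Str.strip line) "class Test") && PySem.Str.isIn ":" line then
      -- in_test_class = True; added_config = False; continue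
      pvGoA content rest newLines true false
    else if inTestClass && !addedConfig && !(PySem.Str.strip line == "")
            && !(PySem.Str.startswith (PySem.Str.strip line) "\"\"\"") then
      let pos := PySem.Str.find content line
      let newLines :=
        if !(PySem.Str.isIn "router_module" (PySem.Str.slice content (some pos) (some (pos + 500)))) then
          PySem.List.slice newLines none (some (-1)) ++ pvConfigA ++ [line]  -- new_lines[:-1] + config_lines + [line]
        else newLines
      -- added_config = True; in_test_class = False
      pvGoA content rest newLines false true
    else
      pvGoA content rest newLines inTestClass addedConfig

def add_router_configuration_py (content : String) : String :=
  PySem.Str.join "\n" (pvGoA content (PySem.Str.splitlines content) [] false false)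

-- ===== PORT B =====
def pvConfigB : List String :=
  ["    # TODO: Configure router",
   "    router_module = \"dotmac.platform.FIXME.router\"",
   "    router_prefix = \"/FIXME\"",
   ""]

def pvIsTestClass (line : String) : Bool :=
  PySem.Str.startswith (PySem.Str.strip line) "class Test" && PySem.Str.isIn ":" line

def pvNeedsConfig (content line : String) : Bool :=
  let pos := PySem.Str.find content line
  !(PySem.Str.isIn "router_module" (PySem.Str.slice content (some pos) (some (pos + 500))))

mutual
-- outer `while i < n` walk
def pvWalkB (content : String) : List String → List String → List String
  | [], out => out
  | line :: rest, out =>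
    if pvIsTestClass line then pvSeekB content rest (out ++ [line])
    else pvWalkB content rest (out ++ [line])

-- inner `while j < n` loop: seek the first body line after a class header, insert there
def pvSeekB (content : String) : List String → List String → List String
  | [], out => out
  | line :: rest, out =>
    if pvIsTestClass line then pvSeekB content rest (out ++ [line])
    else if !(PySem.Str.strip line == "")
            && !(PySem.Str.startswith (PySem.Str.strip line) "\"\"\"") then
      pvWalkB content rest ((if pvNeedsConfig content line then out ++ pvConfigB else out) ++ [line])
    else pvSeekB content rest (out ++ [line])
end

def add_router_configuration_py_alt (content : String) : String :=
  PySem.Str.join "\n" (pvWalkB content (PySem.Str.splitlines content) [])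

-- ===== PRECONDITION & SPEC =====
def Spec_add_router_configuration_py (content : String) (out : String) : Prop := out = add_router_configuration_py_alt content
instance (content : String) (out : String) : Decidable (Spec_add_router_configuration_py content out) := by unfold Spec_add_router_configuration_py; infer_instance

-- ===== CLAIM (what is proved, stated in full; the proofs are below) =====
def Claim_equal_add_router_configuration_py : Prop := ∀ (content : String), Dom_add_router_configuration_py content → Spec_add_router_configuration_py content (add_router_configuration_py content)

-- ===== LEMMAS AND PROOFS =====

-- A's two reachable loop states are (in_test_class, added_config) ∈ {(False, _), (True, False)};
-- the first is B's `walk`, the second B's `seek`.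
theorem pvGoA_eq_walk_seek (content : String) (rest : List String) :
    (∀ acc ac, pvGoA content rest acc false ac = pvWalkB content rest acc) ∧
    (∀ acc, pvGoA content rest acc true false = pvSeekB content rest acc) := by
  induction rest with
  | nil => exact ⟨fun _ _ => rfl, fun _ => rfl⟩
  | cons line rest ih =>
    constructor
    · intro acc ac
      simp only [pvGoA, pvWalkB, pvIsTestClass, Bool.false_and, Bool.false_eq_true, if_false]
      split_ifs
      · exact ih.2 _
      · exact ih.1 _ _
    · intro acc
      simp only [pvGoA, pvSeekB, pvIsTestClass, pvNeedsConfig, Bool.true_and, Bool.not_false]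
      split_ifs
      · exact ih.2 _
      · rw [PySem.List.slice_to_neg_one, List.dropLast_concat, ih.1]
        simp [pvConfigA, pvConfigB]
      · exact ih.1 _ _
      · exact ih.2 _

-- ===== VERDICT (by name: the statement is the Claim_ definition above) =====
theorem add_router_configuration_py_spec : Claim_equal_add_router_configuration_py := by
  intro content _
  unfold Spec_add_router_configuration_py add_router_configuration_py add_router_configuration_py_alt
  rw [(pvGoA_eq_walk_seek content (PySem.Str.splitlines content)).1]
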